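-- pv_equiv track=rewrite | github.com/SEP490-EduVi/SEP490_AI | slide_generator/content_generator.py | _find_relevant_sections
-- ===== SOURCE A (Python) =====
-- MAX_RELEVANT_SECTIONS = 3  # max textbook sections per batch
--
-- def _find_relevant_sections(
--     concept_names: list[str],
--     sections: list[dict],
-- ) -> list[dict]:
--     """
--     Return sections that mention any of the given concept names (case-insensitive).
--     Falls back to the first 2 sections when nothing matches.
--     """
--     if not concept_names:
--         return sections[:2] if sections else []
--
--     lowered_names = [n.lower() for n in concept_names]
--
--     matched = [
--         sec for sec in sections
--         if any(
--             name in sec.get("content", "").lower()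
--             or name in sec.get("heading", "").lower()
--             for name in lowered_names
--         )
--     ]
--
--     if not matched and sections:
--         return sections[:2]  # always give Gemini some textbook context
--
--     return matched[:MAX_RELEVANT_SECTIONS]
-- ===== SOURCE B (Python) =====
-- MAX_RELEVANT_SECTIONS = 3  # max textbook sections per batch
--
--
-- def _find_relevant_sections(concept_names, sections):
--     # Different algorithm: instead of testing `name in text` for every name
--     # against every section text, build a first-character index of the
--     # lowered names once, then scan each section's text position by position,
--     # probing only the names whose first character matches the current
--     # character (a simple multi-pattern search); each section is lowercased
--     # once and the section scan stops after MAX_RELEVANT_SECTIONS matches.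
--     if not concept_names:
--         return sections[:2]
--
--     lowered = [n.lower() for n in concept_names]
--     has_empty = "" in lowered  # an empty concept name matches every section
--     index = {}
--     for ln in lowered:
--         if ln:
--             index.setdefault(ln[0], []).append(ln)
--
--     def mentions(text):
--         for i, ch in enumerate(text):
--             for ln in index.get(ch, ()):
--                 if text.startswith(ln, i):
--                     return True
--         return False
--
--     matched = []
--     for sec in sections:
--         if (has_empty
--                 or mentions(sec.get("content", "").lower())
--                 or mentions(sec.get("heading", "").lower())):
--             matched.append(sec)
--             if len(matched) == MAX_RELEVANT_SECTIONS:
--                 return matched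
--     return matched if matched else sections[:2]
-- ===== Notes on version B (the rewrite author's own statement) =====
-- stated objective: faster
-- what changed: B replaces A's per-name substring tests (each name run by `in` over every section's re-lowered content and heading) with a first-character-indexed multi-pattern scan: the lowered names are grouped by first character once, each section text is lowercased once and scanned position by position probing only names starting with the current character, and the section loop exits as soon as 3 matches are collected.
import Mathlib
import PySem

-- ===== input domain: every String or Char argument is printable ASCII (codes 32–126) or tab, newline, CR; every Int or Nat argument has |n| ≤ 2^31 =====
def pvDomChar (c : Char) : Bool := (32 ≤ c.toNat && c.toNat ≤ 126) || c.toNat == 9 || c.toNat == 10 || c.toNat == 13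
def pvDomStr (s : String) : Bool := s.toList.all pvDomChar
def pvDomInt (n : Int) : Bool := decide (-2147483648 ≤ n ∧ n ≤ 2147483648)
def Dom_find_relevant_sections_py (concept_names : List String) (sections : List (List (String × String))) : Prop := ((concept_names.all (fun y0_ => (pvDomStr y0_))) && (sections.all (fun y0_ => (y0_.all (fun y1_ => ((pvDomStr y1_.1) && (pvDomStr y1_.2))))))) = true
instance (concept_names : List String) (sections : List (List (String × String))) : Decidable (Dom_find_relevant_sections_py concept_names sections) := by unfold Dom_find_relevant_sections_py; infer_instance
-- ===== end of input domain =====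

-- B replaces A's per-name `in` tests with a first-character-indexed multi-pattern scan of each
-- section text (lowercased once), early-exiting after 3 matched sections; same return value.

-- ===== PORT A =====
def secMatchA (lowered : List String) (sec : List (String × String)) : Bool :=
  lowered.any (fun name =>
    PySem.Str.isIn name (PySem.Str.lower (PySem.Dict.getD ⟨sec⟩ "content" "")) ||
    PySem.Str.isIn name (PySem.Str.lower (PySem.Dict.getD ⟨sec⟩ "heading" "")))

def find_relevant_sections_py (concept_names : List String) (sections : List (List (String × String))) : List (List (String × String)) :=
  if concept_names = [] then
    (if sections ≠ [] then PySem.List.slice sections none (some 2) else [])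
  else
    let lowered_names := concept_names.map PySem.Str.lower
    let matched := sections.filter (secMatchA lowered_names)
    if matched = [] ∧ sections ≠ [] then PySem.List.slice sections none (some 2)
    else PySem.List.slice matched none (some 3)

-- ===== PORT B =====
-- index.setdefault(ln[0], []).append(ln) for nonempty ln; skip for empty ln
def buildStep (d : PySem.Dict Char (List String)) (ln : String) : PySem.Dict Char (List String) :=
  match ln.toList with
  | [] => d
  | c :: _ => d.modify c [] (· ++ [ln])

def buildIdx (lowered : List String) : PySem.Dict Char (List String) :=
  lowered.foldl buildStep PySem.Dict.empty

-- 'def mentions(text)': for i, ch in enumerate(text): probe index.get(ch, ()) with text.startswith(ln, i);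
-- text.startswith(ln, i) is exactly Chars.startswith on the i-th suffix, which the recursion walks.
def mentions (idx : PySem.Dict Char (List String)) : List Char → Bool
  | [] => false
  | c :: rest =>
    (idx.getD c []).any (fun ln => PySem.Chars.startswith (c :: rest) ln.toList) || mentions idx rest

def secMatchB (hasEmpty : Bool) (idx : PySem.Dict Char (List String)) (sec : List (String × String)) : Bool :=
  hasEmpty ||
  mentions idx (PySem.Str.lower (PySem.Dict.getD ⟨sec⟩ "content" "")).toList ||
  mentions idx (PySem.Str.lower (PySem.Dict.getD ⟨sec⟩ "heading" "")).toList

-- the for-loop with its early 'return matched' once 3 matches are collected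
def goB (hasEmpty : Bool) (idx : PySem.Dict Char (List String))
    (acc : List (List (String × String))) :
    List (List (String × String)) → List (List (String × String))
  | [] => acc
  | sec :: rest =>
    if secMatchB hasEmpty idx sec then
      let acc' := acc ++ [sec]
      if acc'.length = 3 then acc' else goB hasEmpty idx acc' rest
    else goB hasEmpty idx acc rest

def find_relevant_sections_py_alt (concept_names : List String) (sections : List (List (String × String))) : List (List (String × String)) :=
  if concept_names = [] then PySem.List.slice sections none (some 2)
  else
    let lowered := concept_names.map PySem.Str.lower
    let hasEmpty := lowered.contains ""
    let idx := buildIdx lowered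
    let matched := goB hasEmpty idx [] sections
    if matched ≠ [] then matched else PySem.List.slice sections none (some 2)

-- ===== PRECONDITION & SPEC =====
def Spec_find_relevant_sections_py (concept_names : List String) (sections : List (List (String × String))) (out : List (List (String × String))) : Prop := out = find_relevant_sections_py_alt concept_names sections
instance (concept_names : List String) (sections : List (List (String × String))) (out : List (List (String × String))) : Decidable (Spec_find_relevant_sections_py concept_names sections out) := by unfold Spec_find_relevant_sections_py; infer_instance

-- ===== CLAIM (what is proved, stated in full; the proofs are below) =====
def Claim_equal_find_relevant_sections_py : Prop := ∀ (concept_names : List String) (sections : List (List (String × String))), Dom_find_relevant_sections_py concept_names sections → Spec_find_relevant_sections_py concept_names sections (find_relevant_sections_py concept_names sections)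

-- ===== LEMMAS AND PROOFS =====
lemma buildIdx_getD_aux (l : List String) (d : PySem.Dict Char (List String)) (c : Char) :
    (l.foldl buildStep d).getD c []
      = d.getD c [] ++ l.filter (fun ln => ln.toList.head? == some c) := by
  induction l generalizing d with
  | nil => simp
  | cons ln t ih =>
    simp only [List.foldl_cons, List.filter_cons]
    cases h : ln.toList with
    | nil => simp [buildStep, h, ih]  -- empty name: skipped by both
    | cons c0 _ =>
      rw [show buildStep d ln = d.modify c0 [] (· ++ [ln]) by simp [buildStep, h]]
      rw [ih, PySem.Dict.getD_modify]
      by_cases hc : c = c0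
      · subst hc; simp
      · simp [hc, Ne.symm hc]

lemma mem_buildIdx (lowered : List String) (c : Char) (n : String) :
    n ∈ (buildIdx lowered).getD c [] ↔ n ∈ lowered ∧ n.toList.head? = some c := by
  unfold buildIdx
  rw [buildIdx_getD_aux]
  simp [List.mem_filter]

lemma mentions_true_iff (idx : PySem.Dict Char (List String)) (cs : List Char) :
    mentions idx cs = true ↔
      ∃ j c rest, cs.drop j = c :: rest ∧
        ∃ n ∈ idx.getD c [], PySem.Chars.startswith (c :: rest) n.toList = true := by
  induction cs with
  | nil =>
    simp only [mentions]
    constructor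
    · intro h; cases h
    · rintro ⟨j, c, rest, hd, -⟩; simp at hd
  | cons c rest ih =>
    simp only [mentions, Bool.or_eq_true, ih]
    constructor
    · rintro (h | ⟨j, c', r', hd, hn⟩)
      · exact ⟨0, c, rest, rfl, by simpa using h⟩
      · exact ⟨j + 1, c', r', hd, hn⟩
    · rintro ⟨j, c', r', hd, hn⟩
      cases j with
      | zero =>
        simp only [List.drop_zero] at hd
        cases hd
        exact Or.inl (by simpa using hn)
      | succ j => exact Or.inr ⟨j, c', r', hd, hn⟩

lemma scan_iff (lowered : List String) (cs : List Char) :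
    mentions (buildIdx lowered) cs = true ↔
      ∃ n ∈ lowered, n.toList ≠ [] ∧ n.toList <:+: cs := by
  rw [mentions_true_iff]
  constructor
  · rintro ⟨j, c, rest, hd, n, hn, hsw⟩
    rw [mem_buildIdx] at hn
    refine ⟨n, hn.1, by simp [← List.head?_eq_none_iff, hn.2], ?_⟩
    rw [PySem.Chars.startswith_iff] at hsw
    rw [← hd] at hsw
    exact (PySem.Chars.exists_prefix_drop_iff_isIn n.toList cs).1 ⟨j, hsw⟩
      |> (PySem.Chars.isIn_iff_infix n.toList cs).1
  · rintro ⟨n, hn, hne, hinf⟩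
    obtain ⟨j, hpfx⟩ := (PySem.Chars.exists_prefix_drop_iff_isIn n.toList cs).mpr
      ((PySem.Chars.isIn_iff_infix n.toList cs).mpr hinf)
    cases hnl : n.toList with
    | nil => exact absurd hnl hne
    | cons c t =>
      rw [hnl] at hpfx
      obtain ⟨s, hs⟩ := hpfx
      refine ⟨j, c, t ++ s, by rw [← hs]; simp, n, ?_, ?_⟩
      · rw [mem_buildIdx]; exact ⟨hn, by simp [hnl]⟩
      · rw [PySem.Chars.startswith_iff, hnl]; exact ⟨s, by simp⟩

lemma match_eq (lowered : List String) (sec : List (String × String)) :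
    secMatchA lowered sec = secMatchB (lowered.contains "") (buildIdx lowered) sec := by
  rw [Bool.eq_iff_iff]
  simp only [secMatchA, secMatchB, List.any_eq_true, Bool.or_eq_true, scan_iff,
    PySem.Str.isIn_iff_infix, PySem.Str.toList_lower, List.contains_eq_mem, decide_eq_true_eq]
  constructor
  · rintro ⟨n, hn, hin | hin⟩
    · cases hnl : n.toList with
      | nil =>
        left; left
        have hn0 : n = "" := String.toList_inj.mp (by simp [hnl])
        exact hn0 ▸ hn
      | cons c t =>
        left; right
        exact ⟨n, hn, by simp [hnl], hin⟩
    · cases hnl : n.toList with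
      | nil =>
        left; left
        have hn0 : n = "" := String.toList_inj.mp (by simp [hnl])
        exact hn0 ▸ hn
      | cons c t => exact Or.inr ⟨n, hn, by simp [hnl], hin⟩
  · rintro ((he | ⟨n, hn, _, hin⟩) | ⟨n, hn, _, hin⟩)
    · exact ⟨"", he, Or.inl (by simp)⟩
    · exact ⟨n, hn, Or.inl hin⟩
    · exact ⟨n, hn, Or.inr hin⟩

lemma goB_eq (hasEmpty : Bool) (idx : PySem.Dict Char (List String))
    (l : List (List (String × String)))
    (acc : List (List (String × String))) (h : acc.length < 3) :
    goB hasEmpty idx acc l = (acc ++ l.filter (secMatchB hasEmpty idx)).take 3 := by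
  induction l generalizing acc with
  | nil => simp [goB]; omega
  | cons sec rest ih =>
    simp only [goB, List.filter_cons]
    by_cases hm : secMatchB hasEmpty idx sec
    · rw [if_pos hm, if_pos hm]
      by_cases h3 : (acc ++ [sec]).length = 3
      · rw [if_pos h3]
        have he : (acc ++ sec :: rest.filter (secMatchB hasEmpty idx)) = (acc ++ [sec]) ++ rest.filter (secMatchB hasEmpty idx) := by simp
        rw [he, List.take_append_of_le_length (by omega), List.take_of_length_le (by omega)]
      · rw [if_neg h3, ih _ (by simp only [List.length_append, List.length_cons, List.length_nil] at h3 ⊢; omega)]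
        simp
    · rw [if_neg hm, if_neg hm, ih _ h]

lemma slice_take {α : Type} (xs : List α) (n : Nat) :
    PySem.List.slice xs none (some (OfNat.ofNat n : Int)) = xs.take n := by
  rw [show (OfNat.ofNat n : Int) = ((n : Nat) : Int) from rfl]
  simp [pysem]

-- ===== VERDICT (by name: the statement is the Claim_ definition above) =====
theorem find_relevant_sections_py_spec : Claim_equal_find_relevant_sections_py := by
  intro cn secs _
  unfold Spec_find_relevant_sections_py find_relevant_sections_py find_relevant_sections_py_alt
  by_cases hcn : cn = []
  · rw [if_pos hcn, if_pos hcn]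
    cases secs with
    | nil => simp [pysem]
    | cons b bs => rw [if_pos (by simp)]
  · simp only [if_neg hcn]
    have hfe : secs.filter (secMatchA (cn.map PySem.Str.lower))
        = secs.filter (secMatchB ((cn.map PySem.Str.lower).contains "") (buildIdx (cn.map PySem.Str.lower))) :=
      List.filter_congr (fun x _ => by rw [match_eq])
    rw [goB_eq _ _ _ _ (by simp)]
    simp only [List.nil_append, hfe]
    rcases hfil : secs.filter (secMatchB ((cn.map PySem.Str.lower).contains "") (buildIdx (cn.map PySem.Str.lower))) with _ | ⟨a, t⟩
    · cases hsecs : secs with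
      | nil =>
        subst hsecs
        simp [pysem]
      | cons b bs =>
        rw [if_pos ⟨rfl, by simp⟩, List.take_nil, if_neg (by simp)]
    · have htk : ((a :: t).take 3) ≠ [] := by simp
      rw [if_neg (by simp : ¬ (a :: t = [] ∧ secs ≠ [])), if_pos htk]
      exact slice_take (a :: t) 3
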